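-- pv_equiv track=rewrite | github.com/RubenGMeijer/SolvingProjectEuler | Project Euler 044 Pentagon numbers.py | generatePentagonals
-- ===== SOURCE A (Python) =====
-- def generatePentagonals(n): # non-inclusive
--     pentagonals=[]
--     incr=1
--     pent=0
--
--     for x in range(n):
--         pentagonals.append(pent)
--         pent+=incr
--         incr+=3
--     return pentagonals
-- ===== SOURCE B (Python) =====
-- def generatePentagonals(n): # non-inclusive
--     return [x * (3 * x - 1) // 2 for x in range(n)]
-- ===== Notes on version B (the rewrite author's own statement) =====
-- stated objective: simpler
-- what changed: Replaces the stateful accumulation of pent/incr with a stateless closed-form map x*(3*x-1)//2 over the indices.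
import Mathlib
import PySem

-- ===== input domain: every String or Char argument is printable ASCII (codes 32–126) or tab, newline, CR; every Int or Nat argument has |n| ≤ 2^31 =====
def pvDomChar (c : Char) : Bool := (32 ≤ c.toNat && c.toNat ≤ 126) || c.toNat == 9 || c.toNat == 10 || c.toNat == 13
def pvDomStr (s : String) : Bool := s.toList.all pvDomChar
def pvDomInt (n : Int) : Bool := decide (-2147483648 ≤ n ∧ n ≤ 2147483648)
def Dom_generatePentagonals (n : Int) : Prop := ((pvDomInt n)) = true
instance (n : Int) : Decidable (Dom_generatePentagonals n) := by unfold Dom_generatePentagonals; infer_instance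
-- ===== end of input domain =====

-- ===== PORT A =====
-- A: incremental accumulation of pent/incr over range(n)
def generatePentagonals (n : Int) : List Int :=
  ((PySem.List.pyRange 0 n 1).foldl
    (fun (st : List Int × Int × Int) _ => (st.1 ++ [st.2.1], st.2.1 + st.2.2, st.2.2 + 3))
    ([], 0, 1)).1

-- ===== PORT B =====
-- B: stateless closed form x*(3*x-1)//2 for each index (simpler decomposition, same cost)
def generatePentagonals_alt (n : Int) : List Int :=
  (PySem.List.pyRange 0 n 1).map (fun x => PySem.Int.floordiv (x * (3 * x - 1)) 2)

-- ===== PRECONDITION & SPEC =====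
def Spec_generatePentagonals (n : Int) (out : List Int) : Prop := out = generatePentagonals_alt n
instance (n : Int) (out : List Int) : Decidable (Spec_generatePentagonals n out) := by unfold Spec_generatePentagonals; infer_instance

-- ===== CLAIM (what is proved, stated in full; the proofs are below) =====
def Claim_equal_generatePentagonals : Prop := ∀ (n : Int), Dom_generatePentagonals n → Spec_generatePentagonals n (generatePentagonals n)

-- ===== LEMMAS AND PROOFS =====

-- ===== VERDICT (by name: the statement is the Claim_ definition above) =====
lemma pent_loop (m : Nat) :
    (List.range m).foldl
      (fun (st : List Int × Int × Int) _ => (st.1 ++ [st.2.1], st.2.1 + st.2.2, st.2.2 + 3))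
      ([], 0, 1)
    = ((List.range m).map (fun k : Nat => ((k : Int) * (3 * (k : Int) - 1)) / 2),
       ((m : Int) * (3 * m - 1)) / 2, 3 * (m : Int) + 1) := by
  induction m with
  | zero => simp
  | succ m ih =>
      simp only [List.range_succ, List.foldl_append, List.foldl_cons, List.foldl_nil,
        List.map_append, List.map_cons, List.map_nil, ih, Prod.mk.injEq]
      refine ⟨trivial, ?_, by push_cast; ring⟩
      push_cast
      have h : ((m : Int) + 1) * (3 * ((m : Int) + 1) - 1)
          = (m : Int) * (3 * (m : Int) - 1) + 2 * (3 * (m : Int) + 1) := by ring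
      rw [h]
      omega

theorem generatePentagonals_spec : Claim_equal_generatePentagonals := by
  intro n _
  unfold Spec_generatePentagonals generatePentagonals generatePentagonals_alt
  rw [PySem.List.pyRange_one]
  simp only [zero_add, Int.sub_zero]
  rw [List.foldl_map, pent_loop, List.map_map]
  simp [Function.comp]
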